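-- pv_equiv track=rewrite | github.com/gensecaihq/Wazuh-MCP-Server | src/wazuh_mcp_server/fastmcp_server.py | _categorize_threats
-- ===== SOURCE A (Python) =====
-- from typing import Dict, List, Any, Optional, Annotated
--
-- def _categorize_threats(alerts: List[dict]) -> dict:
--     """Categorize threats based on alert patterns."""
--     categories = {
--         "malware": 0,
--         "network_attacks": 0,
--         "privilege_escalation": 0,
--         "data_exfiltration": 0,
--         "system_compromise": 0,
--         "policy_violations": 0
--     }
--
--     for alert in alerts:
--         rule_desc = alert.get("rule", {}).get("description", "").lower()
--
--         if any(keyword in rule_desc for keyword in ["malware", "virus", "trojan", "rootkit"]):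
--             categories["malware"] += 1
--         elif any(keyword in rule_desc for keyword in ["network", "scan", "brute", "dos"]):
--             categories["network_attacks"] += 1
--         elif any(keyword in rule_desc for keyword in ["privilege", "escalation", "sudo", "admin"]):
--             categories["privilege_escalation"] += 1
--         elif any(keyword in rule_desc for keyword in ["data", "exfil", "upload", "transfer"]):
--             categories["data_exfiltration"] += 1
--         elif any(keyword in rule_desc for keyword in ["compromise", "backdoor", "shell"]):
--             categories["system_compromise"] += 1
--         else:
--             categories["policy_violations"] += 1
--
--     return categories
-- ===== SOURCE B (Python) =====
-- def _categorize_threats(alerts):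
--     """Categorize threats based on alert patterns (category-major sieve)."""
--     rules = [
--         ("malware", ["malware", "virus", "trojan", "rootkit"]),
--         ("network_attacks", ["network", "scan", "brute", "dos"]),
--         ("privilege_escalation", ["privilege", "escalation", "sudo", "admin"]),
--         ("data_exfiltration", ["data", "exfil", "upload", "transfer"]),
--         ("system_compromise", ["compromise", "backdoor", "shell"]),
--     ]
--     descs = [a.get("rule", {}).get("description", "").lower() for a in alerts]
--     counts = {}
--     for name, kws in rules:
--         counts[name] = len([d for d in descs if any(k in d for k in kws)])
--         descs = [d for d in descs if not any(k in d for k in kws)]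
--     counts["policy_violations"] = len(descs)
--     return counts
-- ===== Notes on version B (the rewrite author's own statement) =====
-- stated objective: alternative
-- what changed: Replaces A's alert-major if/elif classification loop by a category-major sieve: for each category in priority order one pass counts the matching descriptions and removes them from the pool, the final residue being the policy_violations count.
import Mathlib
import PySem

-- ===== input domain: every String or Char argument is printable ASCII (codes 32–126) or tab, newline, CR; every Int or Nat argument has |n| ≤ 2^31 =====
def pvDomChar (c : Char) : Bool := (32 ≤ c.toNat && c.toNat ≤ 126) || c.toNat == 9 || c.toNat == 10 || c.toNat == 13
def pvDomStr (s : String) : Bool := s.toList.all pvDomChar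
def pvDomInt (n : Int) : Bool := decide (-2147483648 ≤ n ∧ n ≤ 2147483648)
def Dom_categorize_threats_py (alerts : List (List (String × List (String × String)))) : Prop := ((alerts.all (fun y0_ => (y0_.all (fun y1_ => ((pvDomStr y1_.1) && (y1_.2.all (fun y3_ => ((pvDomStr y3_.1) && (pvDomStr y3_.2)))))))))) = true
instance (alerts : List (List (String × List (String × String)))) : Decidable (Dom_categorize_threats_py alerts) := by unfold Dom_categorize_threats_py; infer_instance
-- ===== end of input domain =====

-- B replaces A's per-alert if/elif classification loop by a category-major sieve: one pass per
-- category over the (shrinking) list of descriptions, counting and removing the matches, so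
-- priority comes from removal, not from a branch ladder (objective: alternative).

-- ===== PORT A =====
def ctA_desc (alert : List (String × List (String × String))) : String :=
  PySem.Str.lower ((PySem.Dict.mk ((PySem.Dict.mk alert).getD "rule" [])).getD "description" "")

def ctA_step (d : PySem.Dict String Int) (alert : List (String × List (String × String))) : PySem.Dict String Int :=
  let rule_desc := ctA_desc alert
  if ["malware", "virus", "trojan", "rootkit"].any (fun k => PySem.Str.isIn k rule_desc) then
    d.modify "malware" 0 (· + 1)
  else if ["network", "scan", "brute", "dos"].any (fun k => PySem.Str.isIn k rule_desc) then
    d.modify "network_attacks" 0 (· + 1)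
  else if ["privilege", "escalation", "sudo", "admin"].any (fun k => PySem.Str.isIn k rule_desc) then
    d.modify "privilege_escalation" 0 (· + 1)
  else if ["data", "exfil", "upload", "transfer"].any (fun k => PySem.Str.isIn k rule_desc) then
    d.modify "data_exfiltration" 0 (· + 1)
  else if ["compromise", "backdoor", "shell"].any (fun k => PySem.Str.isIn k rule_desc) then
    d.modify "system_compromise" 0 (· + 1)
  else
    d.modify "policy_violations" 0 (· + 1)

def categorize_threats_py (alerts : List (List (String × List (String × String)))) : List (String × Int) :=
  let categories : PySem.Dict String Int :=
    PySem.Dict.ofList [("malware", 0), ("network_attacks", 0), ("privilege_escalation", 0),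
                       ("data_exfiltration", 0), ("system_compromise", 0), ("policy_violations", 0)]
  (alerts.foldl ctA_step categories).items

-- ===== PORT B =====
def ctB_rules : List (String × List String) :=
  [("malware", ["malware", "virus", "trojan", "rootkit"]),
   ("network_attacks", ["network", "scan", "brute", "dos"]),
   ("privilege_escalation", ["privilege", "escalation", "sudo", "admin"]),
   ("data_exfiltration", ["data", "exfil", "upload", "transfer"]),
   ("system_compromise", ["compromise", "backdoor", "shell"])]

def ctB_m (kws : List String) (d : String) : Bool := kws.any (fun k => PySem.Str.isIn k d)

def ctB_desc (alert : List (String × List (String × String))) : String :=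
  PySem.Str.lower ((PySem.Dict.mk ((PySem.Dict.mk alert).getD "rule" [])).getD "description" "")

-- counts is a dict whose keys are all fresh, so each 'counts[name] = …' is an append
def categorize_threats_py_alt (alerts : List (List (String × List (String × String)))) : List (String × Int) :=
  let descs := alerts.map ctB_desc
  let st := ctB_rules.foldl
    (fun (st : List (String × Int) × List String) r =>
      (st.1 ++ [(r.1, ((st.2.filter (ctB_m r.2)).length : Int))],
       st.2.filter (fun d => ! ctB_m r.2 d)))
    (([] : List (String × Int)), descs)
  st.1 ++ [("policy_violations", (st.2.length : Int))]

-- ===== PRECONDITION & SPEC =====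
def Spec_categorize_threats_py (alerts : List (List (String × List (String × String)))) (out : List (String × Int)) : Prop := out = categorize_threats_py_alt alerts
instance (alerts : List (List (String × List (String × String)))) (out : List (String × Int)) : Decidable (Spec_categorize_threats_py alerts out) := by unfold Spec_categorize_threats_py; infer_instance

-- ===== CLAIM (what is proved, stated in full; the proofs are below) =====
def Claim_equal_categorize_threats_py : Prop := ∀ (alerts : List (List (String × List (String × String)))), Dom_categorize_threats_py alerts → Spec_categorize_threats_py alerts (categorize_threats_py alerts)

-- ===== LEMMAS AND PROOFS =====

def ctNames : List String :=
  ["malware", "network_attacks", "privilege_escalation", "data_exfiltration", "system_compromise", "policy_violations"]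

-- first-matching category of a (lowercased) description string
def ctBucket (rd : String) : String :=
  ((ctB_rules.find? (fun r => ctB_m r.2 rd)).map (·.1)).getD "policy_violations"

-- common middle form: the counts of each bucket among the descriptions
def ctMid (alerts : List (List (String × List (String × String)))) : List (String × Int) :=
  ctNames.map (fun n => (n, (((alerts.map ctB_desc).map ctBucket).count n : Int)))

-- ---------- A equals the middle form ----------

set_option maxHeartbeats 1000000 in
theorem ctA_gen (d : PySem.Dict String Int) (rd : String) :
    (if ["malware", "virus", "trojan", "rootkit"].any (fun k => PySem.Str.isIn k rd) then
       d.modify "malware" 0 (· + 1)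
     else if ["network", "scan", "brute", "dos"].any (fun k => PySem.Str.isIn k rd) then
       d.modify "network_attacks" 0 (· + 1)
     else if ["privilege", "escalation", "sudo", "admin"].any (fun k => PySem.Str.isIn k rd) then
       d.modify "privilege_escalation" 0 (· + 1)
     else if ["data", "exfil", "upload", "transfer"].any (fun k => PySem.Str.isIn k rd) then
       d.modify "data_exfiltration" 0 (· + 1)
     else if ["compromise", "backdoor", "shell"].any (fun k => PySem.Str.isIn k rd) then
       d.modify "system_compromise" 0 (· + 1)
     else
       d.modify "policy_violations" 0 (· + 1))
    = d.modify (ctBucket rd) 0 (· + 1) := by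
  unfold ctBucket ctB_rules ctB_m
  simp only [List.find?]
  cases h1 : (["malware", "virus", "trojan", "rootkit"].any fun k => PySem.Str.isIn k rd) <;>
  cases h2 : (["network", "scan", "brute", "dos"].any fun k => PySem.Str.isIn k rd) <;>
  cases h3 : (["privilege", "escalation", "sudo", "admin"].any fun k => PySem.Str.isIn k rd) <;>
  cases h4 : (["compromise", "backdoor", "shell"].any fun k => PySem.Str.isIn k rd) <;>
  cases h5 : (["data", "exfil", "upload", "transfer"].any fun k => PySem.Str.isIn k rd) <;>
  simp only [h1, h2, h3, h4, h5] <;> simp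

theorem ctA_step_eq (d : PySem.Dict String Int) (a : List (String × List (String × String))) :
    ctA_step d a = d.modify (ctBucket (ctB_desc a)) 0 (· + 1) := by
  simp only [ctA_step, ctA_desc, ctB_desc]
  exact ctA_gen d _

set_option maxHeartbeats 1000000 in
theorem ctBucket_mem (rd : String) : ctBucket rd ∈ ctNames := by
  unfold ctBucket ctB_rules ctB_m ctNames
  simp only [List.find?]
  cases h1 : (["malware", "virus", "trojan", "rootkit"].any fun k => PySem.Str.isIn k rd) <;>
  cases h2 : (["network", "scan", "brute", "dos"].any fun k => PySem.Str.isIn k rd) <;>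
  cases h3 : (["privilege", "escalation", "sudo", "admin"].any fun k => PySem.Str.isIn k rd) <;>
  cases h4 : (["compromise", "backdoor", "shell"].any fun k => PySem.Str.isIn k rd) <;>
  cases h5 : (["data", "exfil", "upload", "transfer"].any fun k => PySem.Str.isIn k rd) <;>
  simp only [h1, h2, h3, h4, h5] <;> simp

theorem ctA_eq_mid (alerts : List (List (String × List (String × String)))) :
    categorize_threats_py alerts = ctMid alerts := by
  simp only [categorize_threats_py, ctMid]
  have hfun : ctA_step = fun (d : PySem.Dict String Int) a => d.modify (ctBucket (ctB_desc a)) 0 (· + 1) := by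
    funext d a; exact ctA_step_eq d a
  rw [hfun]
  set d0 : PySem.Dict String Int :=
    PySem.Dict.ofList [("malware", 0), ("network_attacks", 0), ("privilege_escalation", 0),
                       ("data_exfiltration", 0), ("system_compromise", 0), ("policy_violations", 0)] with hd0
  set l := (alerts.map ctB_desc).map ctBucket with hl
  have hfold : List.foldl (fun (d : PySem.Dict String Int) a => d.modify (ctBucket (ctB_desc a)) 0 (· + 1)) d0 alerts
      = List.foldl (fun d x => d.modify x 0 (· + 1)) d0 l := by
    rw [hl, List.foldl_map, List.foldl_map]
  rw [hfold]
  have hkeys : (l.foldl (fun d x => d.modify x 0 (· + 1)) d0).keys = ctNames := by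
    rw [PySem.Dict.keys_foldl_modify]
    have h1 : d0.keys = ctNames := by rw [hd0]; decide
    rw [h1, PySem.Set.update_eq_append_filter]
    have h2 : (PySem.Set.ofList l).filter (fun y => !(PySem.Set.contains ctNames y)) = [] := by
      apply List.filter_eq_nil_iff.mpr
      intro x hx
      have hx' : x ∈ l := (PySem.Set.mem_ofList _ _).mp hx
      obtain ⟨a, _, rfl⟩ := List.mem_map.mp (hl ▸ hx')
      simp [ctBucket_mem a]
    rw [h2, List.append_nil]
  have hnodup : (l.foldl (fun d x => d.modify x 0 (· + 1)) d0).keys.Nodup := by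
    rw [hkeys]; decide
  rw [PySem.Dict.items_eq_map_keys _ hnodup 0, hkeys]
  apply List.map_congr_left
  intro name hname
  rw [PySem.Dict.getD_foldl_modify_add_one]
  have h0 : d0.getD name 0 = 0 := by
    fin_cases hname <;> (rw [hd0]; decide)
  rw [h0, zero_add]

-- ---------- B equals the middle form ----------

-- the per-description bucket rewritten as the nested-if ladder
set_option maxHeartbeats 1000000 in
theorem ctBucket_ite (rd : String) :
    ctBucket rd =
      (if ctB_m ["malware", "virus", "trojan", "rootkit"] rd then "malware"
       else if ctB_m ["network", "scan", "brute", "dos"] rd then "network_attacks"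
       else if ctB_m ["privilege", "escalation", "sudo", "admin"] rd then "privilege_escalation"
       else if ctB_m ["data", "exfil", "upload", "transfer"] rd then "data_exfiltration"
       else if ctB_m ["compromise", "backdoor", "shell"] rd then "system_compromise"
       else "policy_violations") := by
  unfold ctBucket ctB_rules
  simp only [List.find?]
  cases h1 : ctB_m ["malware", "virus", "trojan", "rootkit"] rd <;>
  cases h2 : ctB_m ["network", "scan", "brute", "dos"] rd <;>
  cases h3 : ctB_m ["privilege", "escalation", "sudo", "admin"] rd <;>
  cases h4 : ctB_m ["compromise", "backdoor", "shell"] rd <;>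
  cases h5 : ctB_m ["data", "exfil", "upload", "transfer"] rd <;>
  simp only [h1, h2, h3, h4, h5] <;> simp

theorem ctCount_eq (ds : List String) (n : String)
    (p : String → Bool) (hp : ∀ d, (ctBucket d == n) = p d) :
    (ds.map ctBucket).count n = ds.countP p := by
  rw [List.count_eq_countP, List.countP_map]
  exact List.countP_congr (fun a _ => by simp [Function.comp, hp a])

set_option maxHeartbeats 2000000 in
theorem ctB_eq_mid (alerts : List (List (String × List (String × String)))) :
    categorize_threats_py_alt alerts = ctMid alerts := by
  simp only [categorize_threats_py_alt, ctMid, ctB_rules, ctNames, List.foldl, List.map,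
             List.nil_append, List.cons_append, List.cons.injEq, Prod.mk.injEq, true_and,
             and_true, List.filter_filter, Nat.cast_inj]
  set ds := alerts.map ctB_desc with hds
  and_intros <;>
  · rw [List.countP_eq_length_filter.symm]
    refine (ctCount_eq ds _ _ (fun d => ?_)).symm
    rw [ctBucket_ite d]
    cases h1 : ctB_m ["malware", "virus", "trojan", "rootkit"] d <;>
    cases h2 : ctB_m ["network", "scan", "brute", "dos"] d <;>
    cases h3 : ctB_m ["privilege", "escalation", "sudo", "admin"] d <;>
    cases h4 : ctB_m ["data", "exfil", "upload", "transfer"] d <;>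
    cases h5 : ctB_m ["compromise", "backdoor", "shell"] d <;>
    simp [h1, h2, h3, h4, h5]

-- ===== VERDICT (by name: the statement is the Claim_ definition above) =====
theorem categorize_threats_py_spec : Claim_equal_categorize_threats_py := by
  intro alerts _
  unfold Spec_categorize_threats_py
  rw [ctA_eq_mid, ctB_eq_mid]
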